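-- pv_equiv track=rewrite | github.com/yejeeni/YeoBaek-Coding-Test-Study | 김민지/23주차/[PGS]귤고르기_Lv2.py | solution
-- ===== SOURCE A (Python) =====
-- from collections import Counter
--
-- def solution(k, tangerine):
--     c = sorted(Counter(tangerine).values(), reverse=True)
--     get = 0
--     var = 0
--     for n in c:
--         get += n
--         var += 1
--         if get >= k:  # k개를 채우면 종료
--             break
--
--     return var
-- ===== SOURCE B (Python) =====
-- from collections import Counter
--
-- def solution(k, tangerine):
--     counts = Counter(tangerine)
--     freq_of_count = Counter(counts.values())  # how many sizes occur with each frequency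
--     get = 0
--     var = 0
--     for f in range(len(tangerine), 0, -1):  # frequencies, largest first (counting-sort bucket scan)
--         for _ in range(freq_of_count[f]):
--             get += f
--             var += 1
--             if get >= k:
--                 return var
--     return var
-- ===== Notes on version B (the rewrite author's own statement) =====
-- stated objective: alternative
-- what changed: Replaces sorting the Counter's values with a count-of-counts Counter and a counting-sort-style bucket scan over frequencies from len(tangerine) down to 1, with the add/increment/test-and-return loop inside the buckets.
import Mathlib
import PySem

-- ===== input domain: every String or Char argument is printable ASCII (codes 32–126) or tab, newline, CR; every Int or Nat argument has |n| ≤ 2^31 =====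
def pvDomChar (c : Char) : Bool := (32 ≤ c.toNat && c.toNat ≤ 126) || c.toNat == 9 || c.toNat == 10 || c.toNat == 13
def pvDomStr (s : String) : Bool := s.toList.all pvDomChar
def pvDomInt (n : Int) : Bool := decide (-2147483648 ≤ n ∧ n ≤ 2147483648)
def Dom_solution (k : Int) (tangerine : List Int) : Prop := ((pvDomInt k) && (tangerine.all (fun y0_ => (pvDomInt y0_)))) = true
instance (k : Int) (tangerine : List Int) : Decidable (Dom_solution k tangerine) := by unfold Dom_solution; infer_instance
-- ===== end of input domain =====

-- B replaces A's comparison sort of the counts by a counting-sort-style bucket scan over a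
-- count-of-counts Counter, walking frequencies from len(tangerine) down to 1 (objective: alternative).

-- ===== PORT A =====
-- A's 'for n in c: get += n; var += 1; if get >= k: break' loop
def pyLoopA (k : Int) : List Int → Int → Int → Int
  | [], _, var => var
  | n :: rest, get, var =>
    let get' := get + n
    let var' := var + 1
    if get' ≥ k then var' else pyLoopA k rest get' var'

def solution (k : Int) (tangerine : List Int) : Int :=
  let c := PySem.List.sorted (PySem.Dict.counter tangerine).values (fun x => x) true
  pyLoopA k c 0 0

-- ===== PORT B =====
-- B's inner 'for _ in range(freq_of_count[f]): …' loop; Sum.inr r = 'return var' fired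
def pyInnerB (k f : Int) : Nat → Int → Int → (Int × Int) ⊕ Int
  | 0, get, var => Sum.inl (get, var)
  | m + 1, get, var =>
    let get' := get + f
    let var' := var + 1
    if get' ≥ k then Sum.inr var' else pyInnerB k f m get' var'

-- B's outer 'for f in range(len(tangerine), 0, -1): …' loop
def pyOuterB (k : Int) (foc : PySem.Dict Int Int) : List Int → Int → Int → Int
  | [], _, var => var
  | f :: fs, get, var =>
    match pyInnerB k f ((foc.getD f 0).toNat) get var with
    | Sum.inr r => r
    | Sum.inl (g, v) => pyOuterB k foc fs g v

def solution_alt (k : Int) (tangerine : List Int) : Int :=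
  let counts := PySem.Dict.counter tangerine
  let foc := PySem.Dict.counter counts.values
  pyOuterB k foc (PySem.List.pyRange (tangerine.length : Int) 0 (-1)) 0 0

-- ===== PRECONDITION & SPEC =====
def Spec_solution (k : Int) (tangerine : List Int) (out : Int) : Prop := out = solution_alt k tangerine
instance (k : Int) (tangerine : List Int) (out : Int) : Decidable (Spec_solution k tangerine out) := by unfold Spec_solution; infer_instance

-- ===== CLAIM (what is proved, stated in full; the proofs are below) =====
def Claim_equal_solution : Prop := ∀ (k : Int) (tangerine : List Int), Dom_solution k tangerine → Spec_solution k tangerine (solution k tangerine)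

-- ===== LEMMAS AND PROOFS =====

-- Running A's loop over 'replicate m f ++ rest' is B's inner loop, then the rest.
theorem loopA_replicate (k f : Int) (m : Nat) :
    ∀ (get var : Int) (rest : List Int),
      pyLoopA k (List.replicate m f ++ rest) get var =
        match pyInnerB k f m get var with
        | Sum.inl (g, v) => pyLoopA k rest g v
        | Sum.inr r => r := by
  induction m with
  | zero => intro get var rest; simp [pyInnerB]
  | succ m ih =>
    intro get var rest
    simp only [List.replicate_succ, List.cons_append, pyLoopA, pyInnerB]
    split_ifs with h
    · simp
    · exact ih _ _ _

-- B's outer loop is A's loop over the bucket-expanded list.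
theorem outerB_eq_loopA (k : Int) (foc : PySem.Dict Int Int) :
    ∀ (fs : List Int) (get var : Int),
      pyOuterB k foc fs get var =
        pyLoopA k (fs.flatMap fun f => List.replicate ((foc.getD f 0).toNat) f) get var := by
  intro fs
  induction fs with
  | nil => intro get var; simp [pyOuterB, pyLoopA]
  | cons f fs ih =>
    intro get var
    simp only [pyOuterB, List.flatMap_cons, loopA_replicate]
    cases h : pyInnerB k f ((foc.getD f 0).toNat) get var with
    | inl gv => cases gv with | mk g v => simp [ih]
    | inr r => simp

-- count of x in the bucket expansion: V.count x if x is a bucket, else 0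
theorem count_expand (V : List Int) (x : Int) :
    ∀ (fs : List Int), fs.Nodup →
      ((fs.flatMap fun f => List.replicate (V.count f) f).count x)
        = if x ∈ fs then V.count x else 0 := by
  intro fs
  induction fs with
  | nil => simp
  | cons f fs ih =>
    intro hnd
    rw [List.nodup_cons] at hnd
    simp only [List.flatMap_cons, List.count_append, List.count_replicate, ih hnd.2]
    by_cases hfx : f = x
    · subst hfx
      simp [hnd.1]
    · by_cases hx : x ∈ fs <;> simp [hfx, hx, Ne.symm hfx]

theorem perm_expand (V fs : List Int) (hnd : fs.Nodup) (hcov : ∀ v ∈ V, v ∈ fs) :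
    (fs.flatMap fun f => List.replicate (V.count f) f).Perm V := by
  rw [List.perm_iff_count]
  intro x
  rw [count_expand V x fs hnd]
  by_cases hx : x ∈ fs
  · simp [hx]
  · have : x ∉ V := fun hv => hx (hcov x hv)
    simp [hx, List.count_eq_zero_of_not_mem this]

-- the expansion of a strictly decreasing bucket list is weakly decreasing
theorem pairwise_expand (nf : Int → Nat) :
    ∀ (fs : List Int), fs.Pairwise (· > ·) →
      (fs.flatMap fun f => List.replicate (nf f) f).Pairwise (fun a b : Int => b ≤ a) := by
  intro fs
  induction fs with
  | nil => simp
  | cons f fs ih =>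
    intro hp
    rw [List.pairwise_cons] at hp
    simp only [List.flatMap_cons]
    rw [List.pairwise_append]
    refine ⟨?_, ih hp.2, ?_⟩
    · exact List.pairwise_replicate.mpr (Or.inr le_rfl)
    · intro a ha b hb
      obtain ⟨g, hg, hbg⟩ := List.mem_flatMap.mp hb
      rw [List.eq_of_mem_replicate ha, List.eq_of_mem_replicate hbg]
      exact le_of_lt (hp.1 g hg)

-- range(n, 0, -1) is strictly decreasing
theorem pairwise_gt_countdown (n : Int) :
    (PySem.List.pyRange n 0 (-1)).Pairwise (· > ·) := by
  rw [PySem.List.pyRange_neg_one_eq_reverse]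
  rw [List.pairwise_reverse]
  exact PySem.List.pairwise_lt_pyRange_one 1 (n + 1)

-- sorting the counts descending IS the bucket expansion over range(n, 0, -1)
theorem sorted_eq_expand (V : List Int) (n : Int)
    (hcov : ∀ v ∈ V, 0 < v ∧ v ≤ n) :
    PySem.List.sorted V (fun x => x) true =
      (PySem.List.pyRange n 0 (-1)).flatMap fun f => List.replicate (V.count f) f := by
  have hnd : (PySem.List.pyRange n 0 (-1)).Nodup :=
    (pairwise_gt_countdown n).nodup
  have hcov' : ∀ v ∈ V, v ∈ PySem.List.pyRange n 0 (-1) := by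
    intro v hv
    rw [PySem.List.mem_pyRange_neg_one]
    exact (hcov v hv)
  have hperm : ((PySem.List.pyRange n 0 (-1)).flatMap
      fun f => List.replicate (V.count f) f).Perm V :=
    perm_expand V _ hnd hcov'
  refine List.Perm.eq_of_pairwise (le := fun a b : Int => b ≤ a)
    (fun a b _ _ h1 h2 => le_antisymm h2 h1) ?_ ?_
    ((PySem.List.sorted_perm V (fun x => x) true).trans hperm.symm)
  · exact PySem.List.sorted_pairwise_rev V (fun x => x)
  · exact pairwise_expand _ _ (pairwise_gt_countdown n)

-- every value of Counter(xs) lies in 1..len(xs)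
theorem counter_values_bounds (xs : List Int) :
    ∀ v ∈ (PySem.Dict.counter xs).values, 0 < v ∧ v ≤ (xs.length : Int) := by
  intro v hv
  have : v ∈ (PySem.Dict.counter xs).items.map (·.2) := hv
  rw [PySem.Dict.items_counter] at this
  simp only [List.map_map, List.mem_map, Function.comp] at this
  rcases this with ⟨a, ha, rfl⟩
  have ha' : a ∈ xs := (PySem.Set.mem_ofList xs a).mp ha
  constructor
  · exact_mod_cast List.count_pos_iff.mpr ha'
  · exact_mod_cast List.count_le_length

-- ===== VERDICT (by name: the statement is the Claim_ definition above) =====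
theorem solution_spec : Claim_equal_solution := by
  intro k tangerine _
  unfold Spec_solution solution solution_alt
  set V := (PySem.Dict.counter tangerine).values with hV
  rw [outerB_eq_loopA]
  have hrw : (fun f => List.replicate ((PySem.Dict.counter V).getD f 0).toNat f)
      = fun f => List.replicate (V.count f) f := by
    funext f
    rw [PySem.Dict.getD_counter]
    simp
  rw [hrw, ← sorted_eq_expand V (tangerine.length : Int) (counter_values_bounds tangerine)]
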